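-- pv_equiv track=rewrite | github.com/MutaharAliKhan/automation | Data_Utility_v3/testingggg.py | reinsert_comments
-- ===== SOURCE A (Python) =====
-- def reinsert_comments(script_lines, comments):
--     new_lines = []
--     comment_index = 1
--
--     for index, line in enumerate(script_lines):
--         while comment_index in comments and comment_index <= index + 1:
--             new_lines.append(comments[comment_index])
--             comment_index += 1
--         new_lines.append(line)
--
--     # Add any remaining comments
--     while comment_index in comments:
--         new_lines.append(comments[comment_index])
--         comment_index += 1
--
--     return new_lines
-- ===== SOURCE B (Python) =====
-- def reinsert_comments(script_lines, comments):
--     # Precompute k = length of the contiguous run of keys 1,2,3,... present,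
--     # then interleave: comment i before line i for i <= k, remaining run after.
--     p = 1
--     while p in comments:
--         p += 1
--     k = p - 1
--     out = []
--     for i, line in enumerate(script_lines, start=1):
--         if i <= k:
--             out.append(comments[i])
--         out.append(line)
--     for i in range(len(script_lines) + 1, k + 1):
--         out.append(comments[i])
--     return out
-- ===== Notes on version B (the rewrite author's own statement) =====
-- stated objective: alternative
-- what changed: Replaces A's shared-index nested while loops (one inside the line loop, one trailing) by precomputing the contiguous-run length k of keys 1..k once, then a single conditional interleave over the lines plus a trailing range emit.
import Mathlib
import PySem

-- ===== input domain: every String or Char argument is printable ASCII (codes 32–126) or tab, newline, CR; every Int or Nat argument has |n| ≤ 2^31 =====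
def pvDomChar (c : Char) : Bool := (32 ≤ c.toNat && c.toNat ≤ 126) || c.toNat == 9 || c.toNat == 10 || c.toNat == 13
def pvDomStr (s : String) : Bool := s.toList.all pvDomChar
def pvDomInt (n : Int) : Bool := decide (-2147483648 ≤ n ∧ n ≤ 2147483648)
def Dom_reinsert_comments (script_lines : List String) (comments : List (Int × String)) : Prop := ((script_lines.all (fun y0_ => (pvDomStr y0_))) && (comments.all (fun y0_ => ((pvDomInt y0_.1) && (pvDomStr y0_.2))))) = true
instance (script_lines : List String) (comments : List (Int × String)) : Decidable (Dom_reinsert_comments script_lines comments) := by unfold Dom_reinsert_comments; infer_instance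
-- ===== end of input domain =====

-- B replaces A's shared-index nested while loops by a precomputed run length k and a
-- single conditional interleave plus a trailing range emit (objective: alternative).

-- ===== PORT A =====
-- max key of the dict, used only as a termination measure for the while loops
def pvDictMax (d : PySem.Dict Int String) : Int := d.keys.foldl max 0

-- inner 'while comment_index in comments and comment_index <= index + 1'
def pvAInner (d : PySem.Dict Int String) (idx : Int) (p : Int) (acc : List String) :
    List String × Int :=
  if h : d.contains p = true ∧ p ≤ idx + 1 then
    pvAInner d idx (p + 1) (acc ++ [d.getD p ""])
  else
    (acc, p)
termination_by (idx + 2 - p).toNat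
decreasing_by
  obtain ⟨-, h2⟩ := h
  omega

-- trailing 'while comment_index in comments'
def pvATail (d : PySem.Dict Int String) (p : Int) (acc : List String) : List String :=
  if h : d.contains p = true then
    pvATail d (p + 1) (acc ++ [d.getD p ""])
  else
    acc
termination_by (pvDictMax d + 1 - p).toNat
decreasing_by
  have hm := (PySem.List.le_foldl_max d.keys 0).2 p ((PySem.Dict.contains_iff_mem_keys d p).mp h)
  unfold pvDictMax
  omega

-- the 'for index, line in enumerate(script_lines)' loop, then the trailing while
def pvAGo (d : PySem.Dict Int String) :
    List String → Int → Int → List String → List String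
  | [], _, p, acc => pvATail d p acc
  | l :: rest, idx, p, acc =>
      let r := pvAInner d idx p acc
      pvAGo d rest (idx + 1) r.2 (r.1 ++ [l])

def reinsert_comments (script_lines : List String) (comments : List (Int × String)) : List String :=
  pvAGo (PySem.Dict.ofList comments) script_lines 0 1 []

-- ===== PORT B =====
-- 'p = 1; while p in comments: p += 1' — first key ≥ 1 missing from the dict
def pvRunEnd (d : PySem.Dict Int String) (p : Int) : Int :=
  if h : d.contains p = true then pvRunEnd d (p + 1) else p
termination_by (pvDictMax d + 1 - p).toNat
decreasing_by
  have hm := (PySem.List.le_foldl_max d.keys 0).2 p ((PySem.Dict.contains_iff_mem_keys d p).mp h)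
  unfold pvDictMax
  omega

-- 'for i, line in enumerate(script_lines, start=1): …'
def pvBMain (d : PySem.Dict Int String) (k : Int) :
    List String → Int → List String → List String
  | [], _, out => out
  | l :: rest, i, out =>
      pvBMain d k rest (i + 1) ((if i ≤ k then out ++ [d.getD i ""] else out) ++ [l])

def reinsert_comments_alt (script_lines : List String) (comments : List (Int × String)) : List String :=
  let d := PySem.Dict.ofList comments
  let k := pvRunEnd d 1 - 1
  let out := pvBMain d k script_lines 1 []
  (PySem.List.pyRange ((script_lines.length : Int) + 1) (k + 1) 1).foldl
    (fun out i => out ++ [d.getD i ""]) out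

-- ===== PRECONDITION & SPEC =====
def Spec_reinsert_comments (script_lines : List String) (comments : List (Int × String)) (out : List String) : Prop := out = reinsert_comments_alt script_lines comments
instance (script_lines : List String) (comments : List (Int × String)) (out : List String) : Decidable (Spec_reinsert_comments script_lines comments out) := by unfold Spec_reinsert_comments; infer_instance

-- ===== CLAIM (what is proved, stated in full; the proofs are below) =====
def Claim_equal_reinsert_comments : Prop := ∀ (script_lines : List String) (comments : List (Int × String)), Dom_reinsert_comments script_lines comments → Spec_reinsert_comments script_lines comments (reinsert_comments script_lines comments)

-- ===== LEMMAS AND PROOFS =====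

-- one-step unfolding equations for the two non-structural while loops
lemma aTail_cont (d : PySem.Dict Int String) (p : Int) (acc : List String)
    (h : d.contains p = true) :
    pvATail d p acc = pvATail d (p + 1) (acc ++ [d.getD p ""]) := by
  conv_lhs => rw [pvATail]
  rw [dif_pos h]

lemma aTail_stop (d : PySem.Dict Int String) (p : Int) (acc : List String)
    (h : d.contains p = false) :
    pvATail d p acc = acc := by
  conv_lhs => rw [pvATail]
  rw [dif_neg (by simp [h])]

lemma aInner_cont (d : PySem.Dict Int String) (idx p : Int) (acc : List String)
    (h : d.contains p = true ∧ p ≤ idx + 1) :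
    pvAInner d idx p acc = pvAInner d idx (p + 1) (acc ++ [d.getD p ""]) := by
  conv_lhs => rw [pvAInner]
  rw [dif_pos h]

lemma aInner_stop (d : PySem.Dict Int String) (idx p : Int) (acc : List String)
    (h : ¬ (d.contains p = true ∧ p ≤ idx + 1)) :
    pvAInner d idx p acc = (acc, p) := by
  conv_lhs => rw [pvAInner]
  rw [dif_neg h]

-- pvRunEnd d p is the first q ≥ p with q not a key; everything in [p, q) is a key.
lemma runEnd_spec (d : PySem.Dict Int String) (p : Int) :
    p ≤ pvRunEnd d p ∧ d.contains (pvRunEnd d p) = false ∧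
      ∀ q, p ≤ q → q < pvRunEnd d p → d.contains q = true := by
  fun_induction pvRunEnd d p with
  | case1 p h ih =>
      obtain ⟨ih1, ih2, ih3⟩ := ih
      refine ⟨by omega, ih2, fun q hq1 hq2 => ?_⟩
      rcases eq_or_lt_of_le hq1 with hq | hq
      · exact hq ▸ h
      · exact ih3 q (by omega) hq2
  | case2 p h =>
      exact ⟨le_refl _, by simpa using h, fun q hq1 hq2 => absurd hq2 (by omega)⟩

lemma tail_spec (d : PySem.Dict Int String) :
    ∀ (p : Int) (acc : List String), 1 ≤ p → p ≤ pvRunEnd d 1 →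
      pvATail d p acc = acc ++ (PySem.List.pyRange p (pvRunEnd d 1) 1).map (fun i => d.getD i "") := by
  intro p acc h1 h2
  obtain ⟨-, hnot, hall⟩ := runEnd_spec d 1
  set r := pvRunEnd d 1 with hr
  clear_value r
  obtain ⟨n, hn⟩ : ∃ n : Nat, r - p = n := ⟨(r - p).toNat, by omega⟩
  clear hr
  induction n generalizing p acc with
  | zero =>
      have hpr : p = r := by omega
      rw [hpr, aTail_stop d r acc hnot]
      simp
  | succ m ih =>
      have hlt : p < r := by omega
      rw [aTail_cont d p acc (hall p h1 hlt)]
      rw [ih (p + 1) _ (by omega) (by omega) (by omega)]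
      rw [PySem.List.pyRange_one_cons (show p < r by omega)]
      simp

lemma inner_spec (d : PySem.Dict Int String) (idx : Int) :
    ∀ (p : Int) (acc : List String), 1 ≤ p → p ≤ pvRunEnd d 1 → p ≤ idx + 2 →
      pvAInner d idx p acc =
        (acc ++ (PySem.List.pyRange p (min (pvRunEnd d 1) (idx + 2)) 1).map (fun i => d.getD i ""),
         min (pvRunEnd d 1) (idx + 2)) := by
  intro p acc h1 h2 h3
  obtain ⟨-, hnot, hall⟩ := runEnd_spec d 1
  set r := pvRunEnd d 1 with hr
  clear_value r
  obtain ⟨n, hn⟩ : ∃ n : Nat, min r (idx + 2) - p = n := ⟨(min r (idx + 2) - p).toNat, by omega⟩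
  clear hr
  induction n generalizing p acc with
  | zero =>
      have hstop : ¬ (d.contains p = true ∧ p ≤ idx + 1) := by
        rcases le_or_gt r (idx + 2) with hc | hc
        · have hpr : p = r := by omega
          subst hpr
          simp [hnot]
        · rintro ⟨-, hle⟩
          omega
      rw [aInner_stop d idx p acc hstop]
      have hmp : min r (idx + 2) = p := by omega
      rw [hmp]
      simp
  | succ m ih =>
      have hlt : p < min r (idx + 2) := by omega
      rw [aInner_cont d idx p acc ⟨hall p h1 (by omega), by omega⟩]
      rw [ih (p + 1) _ (by omega) (by omega) (by omega) (by omega)]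
      rw [PySem.List.pyRange_one_cons (show p < min r (idx + 2) by omega)]
      simp

-- the per-line chunk A's inner while emits, as B's conditional sees it
lemma chunk_eq (d : PySem.Dict Int String) (idx : Int) :
    (PySem.List.pyRange (min (pvRunEnd d 1) (idx + 1)) (min (pvRunEnd d 1) (idx + 2)) 1).map
        (fun i => d.getD i "") =
      if idx + 2 ≤ pvRunEnd d 1 then [d.getD (idx + 1) ""] else [] := by
  set r := pvRunEnd d 1
  split_ifs with hc
  · have e1 : min r (idx + 1) = idx + 1 := by omega
    have e2 : min r (idx + 2) = idx + 2 := by omega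
    rw [e1, e2, PySem.List.pyRange_one_cons (show idx + 1 < idx + 2 by omega)]
    simp [PySem.List.pyRange_one, show (idx + 2 - (idx + 1 + 1)).toNat = 0 by omega]
  · have e1 : min r (idx + 1) = min r (idx + 2) := by omega
    rw [e1]
    simp

lemma go_spec (d : PySem.Dict Int String) :
    ∀ (rest : List String) (idx : Int) (acc : List String), 0 ≤ idx →
      pvAGo d rest idx (min (pvRunEnd d 1) (idx + 1)) acc =
        pvBMain d (pvRunEnd d 1 - 1) rest (idx + 1) acc ++
          (PySem.List.pyRange (min (pvRunEnd d 1) (idx + (rest.length : Int) + 1)) (pvRunEnd d 1) 1).map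
            (fun i => d.getD i "") := by
  intro rest
  obtain ⟨hr1, -, -⟩ := runEnd_spec d 1
  induction rest with
  | nil =>
      intro idx acc h0
      rw [pvAGo, pvBMain]
      rw [tail_spec d _ acc (by omega) (by omega)]
      simp
  | cons l rest ih =>
      intro idx acc h0
      rw [pvAGo]
      rw [inner_spec d idx _ acc (by omega) (by omega) (by omega)]
      simp only
      have hmin : min (pvRunEnd d 1) (idx + 2) = min (pvRunEnd d 1) ((idx + 1) + 1) := by omega
      rw [chunk_eq d idx]
      rw [hmin, ih (idx + 1) _ (by omega)]
      rw [pvBMain]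
      have harith : idx + 1 + (rest.length : Int) + 1 = idx + ((l :: rest).length : Int) + 1 := by
        simp
        omega
      rw [harith]
      congr 2
      split_ifs with hc hc' hc' <;> simp_all <;> omega

-- ===== VERDICT (by name: the statement is the Claim_ definition above) =====
theorem reinsert_comments_spec : Claim_equal_reinsert_comments := by
  intro script_lines comments _
  unfold Spec_reinsert_comments reinsert_comments reinsert_comments_alt
  set d := PySem.Dict.ofList comments
  obtain ⟨hr1, -, -⟩ := runEnd_spec d 1
  have hgo := go_spec d script_lines 0 [] (by omega)
  rw [show min (pvRunEnd d 1) (0 + 1) = 1 by omega] at hgo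
  rw [hgo]
  simp only [zero_add]
  rw [PySem.List.foldl_append_singleton_eq_map]
  congr 1
  rw [show pvRunEnd d 1 - 1 + 1 = pvRunEnd d 1 by omega]
  rcases le_or_gt ((script_lines.length : Int) + 1) (pvRunEnd d 1) with hc | hc
  · rw [show min (pvRunEnd d 1) ((script_lines.length : Int) + 1) = (script_lines.length : Int) + 1 by omega]
  · rw [show min (pvRunEnd d 1) ((script_lines.length : Int) + 1) = pvRunEnd d 1 by omega]
    simp [PySem.List.pyRange_one]
    omega
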